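-- pv_equiv track=rewrite | github.com/blackjackal982/Mission-RND | mocktest2_problem3.py | transform
-- ===== SOURCE A (Python) =====
-- import string
--
-- valid_words = string.ascii_uppercase+string.ascii_lowercase
--
-- def remove_adjacent(let):
--   i = 1
--   while i < len(let):
--     if let[i].lower() == let[i-1].lower():
--       let.pop(i)
--       i -= 1
--     i += 1
--   return let
--
-- def transform(sentence):
--     if type(sentence).__name__!='str':
--         raise TypeError
--     vowels = "aeiou"
--     sentence = sentence.split(" ")
--     list_word = []
--     for i in sentence:
--         i = tuple(list(i))
--         list_word.append(i)
--     res = []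
--     for i in list_word:
--         v = []
--         c= []
--         for j in i:
--             if j in valid_words:
--                 if j.lower() in vowels:
--                     v.append(j)
--                 else:
--                     c.append(j)
--         res.append((v+c))
--     final_word = ""
--     res =[remove_adjacent(i) for i in res]
--     for i in res:
--         final_word=final_word+"".join(i)+" "
--     return final_word.strip()
-- ===== SOURCE B (Python) =====
-- import string
--
-- def transform(sentence):
--     if type(sentence).__name__ != 'str':
--         raise TypeError
--     vowels = "aeiou"
--     parts = []
--     for word in sentence.split(" "):
--         letters = [c for c in word if c in string.ascii_letters]
--         ordered = [c for c in letters if c.lower() in vowels] + \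
--                   [c for c in letters if c.lower() not in vowels]
--         out = []
--         prev = None
--         for c in ordered:
--             cl = c.lower()
--             if cl != prev:
--                 out.append(c)
--                 prev = cl
--         parts.append("".join(out))
--     return " ".join(parts).strip()
-- ===== Notes on version B (the rewrite author's own statement) =====
-- stated objective: faster
-- what changed: Replaces the mutating pop-and-reindex while-loop dedup with a single-pass collapse that tracks the last kept lowercase letter, builds the vowel and consonant groups by two filters over the letters instead of a two-accumulator loop, and joins the words with a separator join instead of appending trailing spaces and stripping.
import Mathlib
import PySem

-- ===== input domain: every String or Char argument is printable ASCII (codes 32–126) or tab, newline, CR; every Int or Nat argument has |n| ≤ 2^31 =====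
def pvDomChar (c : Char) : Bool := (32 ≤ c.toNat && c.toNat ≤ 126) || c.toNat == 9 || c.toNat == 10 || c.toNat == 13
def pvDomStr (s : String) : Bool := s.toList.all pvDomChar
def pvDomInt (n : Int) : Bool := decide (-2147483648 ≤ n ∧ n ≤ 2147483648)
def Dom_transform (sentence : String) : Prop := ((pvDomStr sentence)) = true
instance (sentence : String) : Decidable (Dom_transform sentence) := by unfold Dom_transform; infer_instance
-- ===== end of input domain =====

-- B reorders each word vowels-then-consonants and collapses case-insensitive adjacent duplicates in one
-- pass over the reordered letters (tracking the last kept lowercase letter) instead of A's pop-based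
-- while-loop, and joins the words with a separator instead of appending trailing spaces and stripping.

-- ===== PORT A =====
-- valid_words = string.ascii_uppercase + string.ascii_lowercase
def validWords : List Char := "ABCDEFGHIJKLMNOPQRSTUVWXYZabcdefghijklmnopqrstuvwxyz".toList
def vowelsA : List Char := "aeiou".toList

-- the body of remove_adjacent's while-loop: index i, pop(i) on a case-insensitive adjacent match
-- (the guard keeps both indices in range, so getD's default is never read)
def raLoop (l : List Char) (i : Nat) : List Char :=
  if h : i < l.length then
    if PySem.Chars.lowerChar (l.getD i ' ') = PySem.Chars.lowerChar (l.getD (i - 1) ' ') then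
      raLoop (l.eraseIdx i) i
    else
      raLoop l (i + 1)
  else l
termination_by l.length - i
decreasing_by
  · simp only [List.length_eraseIdx, if_pos h]; omega
  · omega

def removeAdjacent (l : List Char) : List Char := raLoop l 1

-- one step of A's vowel/consonant accumulation loop
def stepA (vc : List Char × List Char) (j : Char) : List Char × List Char :=
  if validWords.contains j then
    if vowelsA.contains (PySem.Chars.lowerChar j) then (vc.1 ++ [j], vc.2)
    else (vc.1, vc.2 ++ [j])
  else vc

-- the isinstance check always passes (the argument is a str); tuple(list(i)) keeps the same chars
def transform (sentence : String) : String :=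
  let sentenceWords := PySem.Chars.splitOn sentence.toList [' ']
  let listWord := sentenceWords
  let res := listWord.map (fun w => let vc := w.foldl stepA ([], []); vc.1 ++ vc.2)
  let res2 := res.map removeAdjacent
  let finalWord := res2.foldl (fun acc w => acc ++ w ++ [' ']) []
  String.ofList (PySem.Chars.strip finalWord)

-- ===== PORT B =====
-- string.ascii_letters
def asciiLetters : List Char := "abcdefghijklmnopqrstuvwxyzABCDEFGHIJKLMNOPQRSTUVWXYZ".toList
def vowelsB : List Char := "aeiou".toList

-- one step of B's collapse loop: (out, prev); append c when its lowercase differs from prev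
def collapseStep (st : List Char × Option Char) (c : Char) : List Char × Option Char :=
  let cl := PySem.Chars.lowerChar c
  if some cl ≠ st.2 then (st.1 ++ [c], some cl) else st

def transform_alt (sentence : String) : String :=
  let parts := (PySem.Chars.splitOn sentence.toList [' ']).map (fun w =>
    let letters := w.filter (fun c => asciiLetters.contains c)
    let ordered := letters.filter (fun c => vowelsB.contains (PySem.Chars.lowerChar c))
      ++ letters.filter (fun c => !vowelsB.contains (PySem.Chars.lowerChar c))
    (ordered.foldl collapseStep ([], none)).1)
  String.ofList (PySem.Chars.strip (PySem.Chars.join [' '] parts))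

-- ===== PRECONDITION & SPEC =====
def Spec_transform (sentence : String) (out : String) : Prop := out = transform_alt sentence
instance (sentence : String) (out : String) : Decidable (Spec_transform sentence out) := by unfold Spec_transform; infer_instance

-- ===== CLAIM (what is proved, stated in full; the proofs are below) =====
def Claim_equal_transform : Prop := ∀ (sentence : String), Dom_transform sentence → Spec_transform sentence (transform sentence)

-- ===== LEMMAS AND PROOFS =====

-- reference form of the adjacent-duplicate collapse, as structural recursion on the word
def collapseAux (prev : Option Char) : List Char → List Char
  | [] => []
  | c :: t =>
    if some (PySem.Chars.lowerChar c) = prev then collapseAux prev t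
    else c :: collapseAux (some (PySem.Chars.lowerChar c)) t

lemma foldB_eq (l : List Char) : ∀ (out : List Char) (prev : Option Char),
    (l.foldl collapseStep (out, prev)).1 = out ++ collapseAux prev l := by
  induction l with
  | nil => intro out prev; simp [collapseAux]
  | cons c t ih =>
    intro out prev
    by_cases h : some (PySem.Chars.lowerChar c) = prev
    · simp [collapseStep, h, collapseAux, ih]
    · simp [collapseStep, h, collapseAux, ih]

lemma eraseIdx_append_mid (a b : List Char) (k : Nat) :
    (a ++ b).eraseIdx (a.length + k) = a ++ b.eraseIdx k := by
  induction a with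
  | nil => simp
  | cons y ys ih => simpa [List.eraseIdx, Nat.succ_add] using ih

lemma raLoop_spec (b : List Char) : ∀ (a : List Char) (x : Char),
    raLoop (a ++ x :: b) (a.length + 1)
      = a ++ x :: collapseAux (some (PySem.Chars.lowerChar x)) b := by
  induction b with
  | nil =>
    intro a x
    rw [raLoop]
    simp [collapseAux]

  | cons c t ih =>
    intro a x
    have hlen : a.length + 1 < (a ++ x :: c :: t).length := by simp
    have h1 : (a ++ x :: c :: t).getD (a.length + 1) ' ' = c := by
      rw [List.getD_eq_getElem?_getD, List.getElem?_append_right (by omega)]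
      simp
    have h2 : (a ++ x :: c :: t).getD (a.length + 1 - 1) ' ' = x := by
      rw [List.getD_eq_getElem?_getD, List.getElem?_append_right (by omega)]
      simp
    rw [raLoop, dif_pos hlen, h1, h2]
    by_cases h : PySem.Chars.lowerChar c = PySem.Chars.lowerChar x
    · rw [if_pos h]
      have he : (a ++ x :: c :: t).eraseIdx (a.length + 1) = a ++ x :: t := by
        have := eraseIdx_append_mid a (x :: c :: t) 1
        simpa using this
      rw [he, ih a x]
      simp [collapseAux, h]
    · rw [if_neg h]
      have hr : a ++ x :: c :: t = (a ++ [x]) ++ c :: t := by simp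
      have hi : a.length + 1 + 1 = (a ++ [x]).length + 1 := by simp
      rw [hr, hi, ih (a ++ [x]) c]
      simp [collapseAux, h]

lemma removeAdjacent_eq (l : List Char) : removeAdjacent l = collapseAux none l := by
  cases l with
  | nil => rw [removeAdjacent, raLoop]; simp [collapseAux]
  | cons x t =>
    have := raLoop_spec t [] x
    simp at this
    rw [removeAdjacent]
    simpa [collapseAux] using this

lemma foldA_eq (w : List Char) : ∀ (v c : List Char),
    w.foldl stepA (v, c)
      = (v ++ w.filter (fun j => validWords.contains j && vowelsA.contains (PySem.Chars.lowerChar j)),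
         c ++ w.filter (fun j => validWords.contains j && !vowelsA.contains (PySem.Chars.lowerChar j))) := by
  induction w with
  | nil => intro v c; simp
  | cons j t ih =>
    intro v c
    by_cases h1 : j ∈ validWords
    · by_cases h2 : PySem.Chars.lowerChar j ∈ vowelsA
      · simp [stepA, h1, h2, ih]
      · simp [stepA, h1, h2, ih]
    · simp [stepA, h1, ih]

lemma letters_contains_eq (c : Char) : asciiLetters.contains c = validWords.contains c := by
  have hp : asciiLetters.Perm validWords := by decide
  by_cases h : c ∈ asciiLetters
  · simp [h, hp.mem_iff.mp h]
  · have h2 : c ∉ validWords := fun hc => h (hp.mem_iff.mpr hc)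
    simp [h, h2]

-- per-word agreement: A's accumulate-then-pop-loop equals B's filters-then-collapse
lemma word_eq (w : List Char) :
    removeAdjacent ((w.foldl stepA ([], [])).1 ++ (w.foldl stepA ([], [])).2)
      = (((w.filter (fun c => asciiLetters.contains c)).filter
            (fun c => vowelsB.contains (PySem.Chars.lowerChar c))
          ++ (w.filter (fun c => asciiLetters.contains c)).filter
            (fun c => !vowelsB.contains (PySem.Chars.lowerChar c))).foldl
          collapseStep ([], none)).1 := by
  rw [foldB_eq, removeAdjacent_eq, foldA_eq]
  simp only [List.filter_filter, List.nil_append]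
  congr 2 <;>
    · apply List.filter_congr
      intro c _
      rw [letters_contains_eq]
      simp [vowelsA, vowelsB, Bool.and_comm]

lemma rstrip_append_space (y : List Char) :
    PySem.Chars.rstrip (y ++ [' ']) = PySem.Chars.rstrip y := by
  simp [PySem.Chars.rstrip, show PySem.Chars.isspace ' ' = true from rfl]

lemma strip_append_space (z : List Char) :
    PySem.Chars.strip (z ++ [' ']) = PySem.Chars.strip z := by
  induction z with
  | nil => decide
  | cons a t ih =>
    by_cases h : PySem.Chars.isspace a
    · simpa [PySem.Chars.strip, PySem.Chars.lstrip, h] using ih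
    · simp [PySem.Chars.strip, PySem.Chars.lstrip, h]
      exact rstrip_append_space (a :: t)

lemma foldl_join (rest : List (List Char)) : ∀ (p acc : List Char),
    (p :: rest).foldl (fun acc w => acc ++ w ++ [' ']) acc
      = acc ++ PySem.Chars.join [' '] (p :: rest) ++ [' '] := by
  induction rest with
  | nil => intro p acc; simp [PySem.Chars.join_singleton]
  | cons q r ih =>
    intro p acc
    rw [PySem.Chars.join_cons_cons, List.foldl_cons, ih q]
    simp

lemma strip_fold_join (parts : List (List Char)) :
    PySem.Chars.strip (parts.foldl (fun acc w => acc ++ w ++ [' ']) [])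
      = PySem.Chars.strip (PySem.Chars.join [' '] parts) := by
  cases parts with
  | nil => rfl
  | cons p rest =>
    rw [foldl_join rest p []]
    simp [strip_append_space]

-- ===== VERDICT (by name: the statement is the Claim_ definition above) =====
theorem transform_spec : Claim_equal_transform := by
  intro sentence _
  unfold Spec_transform transform transform_alt
  simp only [List.map_map]
  have hmap : ∀ (ws : List (List Char)),
      ws.map (removeAdjacent ∘ fun w =>
          (List.foldl stepA ([], []) w).1 ++ (List.foldl stepA ([], []) w).2)
        = ws.map (fun w =>
            (List.foldl collapseStep ([], none)
              (List.filter (fun c => vowelsB.contains (PySem.Chars.lowerChar c))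
                  (List.filter (fun c => asciiLetters.contains c) w) ++
                List.filter (fun c => !vowelsB.contains (PySem.Chars.lowerChar c))
                  (List.filter (fun c => asciiLetters.contains c) w))).1) := by
    intro ws
    apply List.map_congr_left
    intro w _
    simpa [Function.comp] using word_eq w
  rw [hmap]
  exact congrArg String.ofList (strip_fold_join _)
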